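-- pv_equiv track=rewrite | github.com/DUYHOCIT/LongTiengTuDong | scripts/gopsrt.py | detect_continuous_segments
-- ===== SOURCE A (Python) =====
-- def time_to_ms(time_str):
--     h, m, s = time_str.split(':')
--     s, ms = s.split(',')
--     return int(h) * 3600000 + int(m) * 60000 + int(s) * 1000 + int(ms)
--
-- def detect_continuous_segments(subtitles, max_segment_size=6):
--     segments = []
--     current_segment = []
--
--     for i, subtitle in enumerate(subtitles):
--         if not subtitle['text']:
--             continue
--
--         # Nếu là đoạn đầu tiên hoặc có khoảng trống với đoạn trước
--         if not current_segment or (i > 0 and time_to_ms(subtitle['start_time']) > time_to_ms(subtitles[i-1]['end_time'])):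
--             if current_segment:  # Đóng nhóm trước nếu có
--                 segments.append(current_segment)
--             current_segment = [subtitle]  # Bắt đầu nhóm mới
--         else:
--             # Nếu liên tục về thời gian, thêm vào nhóm hiện tại
--             if len(current_segment) < max_segment_size:
--                 current_segment.append(subtitle)
--             else:
--                 segments.append(current_segment)
--                 current_segment = [subtitle]
--
--     if current_segment:  # Đóng nhóm cuối cùng
--         segments.append(current_segment)
--
--     return segments
-- ===== SOURCE B (Python) =====
-- def time_to_ms(time_str):
--     h, m, s = time_str.split(':')
--     s, ms = s.split(',')
--     return int(h) * 3600000 + int(m) * 60000 + int(s) * 1000 + int(ms)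
--
-- def detect_continuous_segments(subtitles, max_segment_size=6):
--     # Pass 1: split the kept (non-empty-text) subtitles into maximal continuous runs,
--     # using the raw previous index i-1 for the gap test, like the original.
--     runs = []
--     for i, subtitle in enumerate(subtitles):
--         if not subtitle['text']:
--             continue
--         if runs and not (time_to_ms(subtitle['start_time']) > time_to_ms(subtitles[i - 1]['end_time'])):
--             runs[-1].append(subtitle)
--         else:
--             runs.append([subtitle])
--     # Pass 2: cut every run into consecutive chunks of at most `size` elements.
--     size = max_segment_size if max_segment_size > 1 else 1
--     segments = []
--     for run in runs:
--         while len(run) > size: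
--             segments.append(run[:size])
--             run = run[size:]
--         segments.append(run)
--     return segments
-- ===== Notes on version B (the rewrite author's own statement) =====
-- stated objective: alternative
-- what changed: B replaces A's single loop with an open current-segment accumulator by a two-pass decomposition: first split the kept subtitles into maximal continuous runs (appending to the last run), then cut each run into consecutive chunks of at most max(max_segment_size,1) elements with a slicing while-loop.
import Mathlib
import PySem

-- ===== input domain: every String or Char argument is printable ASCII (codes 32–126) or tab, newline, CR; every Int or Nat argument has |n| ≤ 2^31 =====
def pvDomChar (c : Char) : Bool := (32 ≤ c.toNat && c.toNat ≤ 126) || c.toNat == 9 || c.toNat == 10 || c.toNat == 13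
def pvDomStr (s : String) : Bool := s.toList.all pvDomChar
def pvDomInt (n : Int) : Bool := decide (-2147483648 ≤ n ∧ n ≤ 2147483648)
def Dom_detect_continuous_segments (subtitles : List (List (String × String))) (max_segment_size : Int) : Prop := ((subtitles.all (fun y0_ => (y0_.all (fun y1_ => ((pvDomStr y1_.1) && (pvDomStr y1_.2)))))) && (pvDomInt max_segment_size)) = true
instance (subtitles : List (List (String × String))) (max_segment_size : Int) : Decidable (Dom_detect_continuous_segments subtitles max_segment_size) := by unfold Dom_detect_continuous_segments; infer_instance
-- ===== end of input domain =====

-- B groups the kept subtitles into continuous runs first and then chunks each run,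
-- instead of A's single loop with an open "current segment"; objective: alternative
-- decomposition (two passes), equal return value on all inputs where A returns.

-- ===== PORT A =====
-- shared module helper time_to_ms; the `.getD 0` / wildcard branches are reached only
-- where Python raises (unpacking/ValueError) — those inputs are excluded by Pre_ below.
def pv_time_to_ms (time_str : String) : Int :=
  match (PySem.Str.split? time_str ":").getD [] with
  | [h, m, s] =>
    match (PySem.Str.split? s ",").getD [] with
    | [s2, ms] =>
      (PySem.Int.ofStr? h).getD 0 * 3600000 + (PySem.Int.ofStr? m).getD 0 * 60000 +
      (PySem.Int.ofStr? s2).getD 0 * 1000 + (PySem.Int.ofStr? ms).getD 0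
    | _ => 0
  | _ => 0

-- subtitle['text'] ; `.getD ""` is reached only on a KeyError input (excluded by Pre_)
def pvTextOf (sub : List (String × String)) : String :=
  (PySem.Dict.mk sub).getD "text" ""

-- time_to_ms(subtitle['start_time']) > time_to_ms(subtitles[i-1]['end_time'])
-- (same subexpression in both Python sources; `.getD` defaults only on inputs Pre_ excludes)
def pvGap (subtitles : List (List (String × String))) (i : Int) (sub : List (String × String)) : Bool :=
  pv_time_to_ms ((PySem.Dict.mk sub).getD "start_time" "") >
    pv_time_to_ms ((PySem.Dict.mk (PySem.List.pyGetD subtitles (i - 1) [])).getD "end_time" "")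

-- loop body of A (state = (segments, current_segment), element = (i, subtitle))
def pvStepA (subtitles : List (List (String × String))) (max_segment_size : Int)
    (st : List (List (List (String × String))) × List (List (String × String)))
    (p : Int × List (String × String)) :
    List (List (List (String × String))) × List (List (String × String)) :=
  if pvTextOf p.2 = "" then st
  else if st.2 = [] ∨ (0 < p.1 ∧ pvGap subtitles p.1 p.2 = true) then
    (if st.2 ≠ [] then st.1 ++ [st.2] else st.1, [p.2])
  else if (st.2.length : Int) < max_segment_size then (st.1, st.2 ++ [p.2])
  else (st.1 ++ [st.2], [p.2])

-- the code after A's loop: close the last current_segment if nonempty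
def pvCloseA (st : List (List (List (String × String))) × List (List (String × String))) :
    List (List (List (String × String))) :=
  if st.2 ≠ [] then st.1 ++ [st.2] else st.1

def detect_continuous_segments (subtitles : List (List (String × String))) (max_segment_size : Int) : List (List (List (String × String))) :=
  pvCloseA ((PySem.List.enumerate subtitles 0).foldl (pvStepA subtitles max_segment_size) ([], []))

-- ===== PORT B =====
-- pass-1 loop body of B (state = runs, element = (i, subtitle))
def pvStepB (subtitles : List (List (String × String)))
    (runs : List (List (List (String × String))))
    (p : Int × List (String × String)) : List (List (List (String × String))) :=
  if pvTextOf p.2 = "" then runs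
  else if runs ≠ [] ∧ ¬ (pvGap subtitles p.1 p.2 = true) then
    runs.dropLast ++ [runs.getLastD [] ++ [p.2]]
  else runs ++ [[p.2]]

-- pass 2: the `while len(run) > size` chunking loop of B; run[:size]/run[size:] with
-- 0 ≤ size are exactly take/drop; the `1 ≤ size` conjunct is a totality guard only —
-- every call site passes size ≥ 1.
def pvChunks (size : Int) (run : List (List (String × String))) : List (List (List (String × String))) :=
  if _h : 1 ≤ size ∧ size < (run.length : Int) then
    run.take size.toNat :: pvChunks size (run.drop size.toNat)
  else [run]
termination_by run.length
decreasing_by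
  simp only [List.length_drop]
  omega

def detect_continuous_segments_alt (subtitles : List (List (String × String))) (max_segment_size : Int) : List (List (List (String × String))) :=
  ((PySem.List.enumerate subtitles 0).foldl (pvStepB subtitles) []).foldl
    (fun segments run => segments ++ pvChunks (if max_segment_size > 1 then max_segment_size else 1) run) []

-- ===== PRECONDITION & SPEC =====
-- Pre_ excludes exactly the inputs where the Python A raises: a subtitle without a
-- 'text' key (KeyError), and — for every kept subtitle that is preceded by an earlier
-- kept one, i.e. exactly where A evaluates the gap test — a missing or unparsable
-- 'start_time' on it or 'end_time' on its raw predecessor (KeyError/ValueError).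
def pvTimeOk (t : String) : Bool :=
  match (PySem.Str.split? t ":").getD [] with
  | [h, m, s] =>
    match (PySem.Str.split? s ",").getD [] with
    | [s2, ms] => (PySem.Int.ofStr? h).isSome && (PySem.Int.ofStr? m).isSome &&
                  (PySem.Int.ofStr? s2).isSome && (PySem.Int.ofStr? ms).isSome
    | _ => false
  | _ => false

def pvTimeFieldOk (sub : List (String × String)) (k : String) : Bool :=
  match (PySem.Dict.mk sub).get? k with
  | some t => pvTimeOk t
  | none => false

def pvKept (sub : List (String × String)) : Bool := !(pvTextOf sub == "")

def Pre_detect_continuous_segments (subtitles : List (List (String × String))) (max_segment_size : Int) : Prop :=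
  ((List.range subtitles.length).all (fun i =>
    (PySem.Dict.mk (subtitles.getD i [])).contains "text" &&
    (!(pvKept (subtitles.getD i []) && (subtitles.take i).any pvKept) ||
      (pvTimeFieldOk (subtitles.getD i []) "start_time" &&
       pvTimeFieldOk (subtitles.getD (i - 1) []) "end_time")))) = true

instance (subtitles : List (List (String × String))) (max_segment_size : Int) : Decidable (Pre_detect_continuous_segments subtitles max_segment_size) := by unfold Pre_detect_continuous_segments; infer_instance

def pvWitness_detect_continuous_segments : (List (List (String × String))) × Int :=
  ([[("text", "a"), ("start_time", "0:00:00,000"), ("end_time", "0:00:01,000")],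
    [("text", "b"), ("start_time", "0:00:01,000"), ("end_time", "0:00:02,500")],
    [("text", ""), ("start_time", "0:00:02,500"), ("end_time", "0:00:03,000")]], 6)

def Spec_detect_continuous_segments (subtitles : List (List (String × String))) (max_segment_size : Int) (out : List (List (List (String × String)))) : Prop := out = detect_continuous_segments_alt subtitles max_segment_size
instance (subtitles : List (List (String × String))) (max_segment_size : Int) (out : List (List (List (String × String)))) : Decidable (Spec_detect_continuous_segments subtitles max_segment_size out) := by unfold Spec_detect_continuous_segments; infer_instance

-- ===== CLAIM (what is proved, stated in full; the proofs are below) =====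
def Claim_equal_detect_continuous_segments : Prop := ∀ (subtitles : List (List (String × String))) (max_segment_size : Int), Dom_detect_continuous_segments subtitles max_segment_size → Pre_detect_continuous_segments subtitles max_segment_size → Spec_detect_continuous_segments subtitles max_segment_size (detect_continuous_segments subtitles max_segment_size)

-- ===== LEMMAS AND PROOFS =====

-- generic list facts about getLastD used throughout
theorem pv_getLastD_congr {α : Type} (l : List α) (d d' : α) (h : l ≠ []) :
    l.getLastD d = l.getLastD d' := by
  induction l using List.reverseRecOn with
  | nil => exact absurd rfl h
  | append_singleton l a _ => simp

theorem pv_dropLast_getLastD {α : Type} (l : List α) (d : α) (h : l ≠ []) :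
    l.dropLast ++ [l.getLastD d] = l := by
  induction l using List.reverseRecOn with
  | nil => exact absurd rfl h
  | append_singleton l a _ => simp

-- the invariant tying A's running state (segments, current_segment) to B's runs:
-- either nothing has been collected yet, or runs = rs ++ [r] with A's segments equal to
-- the chunks of rs plus all completed chunks of r and current_segment the last chunk of r.
def pvInv (size : Int) (st : List (List (List (String × String))) × List (List (String × String)))
    (runs : List (List (List (String × String)))) : Prop :=
  (st.1 = [] ∧ st.2 = [] ∧ runs = []) ∨
  (∃ rs r, runs = rs ++ [r] ∧ r ≠ [] ∧
    st.1 = rs.flatMap (pvChunks size) ++ (pvChunks size r).dropLast ∧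
    st.2 = (pvChunks size r).getLastD [])

theorem pvChunks_ne_nil (size : Int) (run : List (List (String × String))) :
    pvChunks size run ≠ [] := by
  unfold pvChunks; split <;> simp

theorem pvChunks_singleton (size : Int) (_hs : 1 ≤ size) (x : List (String × String)) :
    pvChunks size [x] = [[x]] := by
  unfold pvChunks
  rw [dif_neg (by simp only [List.length_cons, List.length_nil]; push_cast; omega)]

theorem pvChunks_drop_ne_nil (size : Int) (run : List (List (String × String)))
    (hc : 1 ≤ size ∧ size < (run.length : Int)) : run.drop size.toNat ≠ [] := by
  have := List.length_drop (l := run) (i := size.toNat)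
  intro hnil
  rw [hnil] at this
  simp at this
  omega

theorem pvChunks_last_ne_nil (size : Int) (_hs : 1 ≤ size) (run : List (List (String × String)))
    (h : run ≠ []) : (pvChunks size run).getLastD [] ≠ [] := by
  fun_induction pvChunks size run with
  | case1 run hc ih =>
    rw [List.getLastD_cons,
      pv_getLastD_congr _ _ [] (pvChunks_ne_nil size (run.drop size.toNat))]
    exact ih (pvChunks_drop_ne_nil size run hc)
  | case2 run hc => simpa using h

theorem pvChunks_last_len_le (size : Int) (hs : 1 ≤ size) (run : List (List (String × String))) :
    ((pvChunks size run).getLastD []).length ≤ size.toNat := by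
  fun_induction pvChunks size run with
  | case1 run hc ih =>
    rw [List.getLastD_cons,
      pv_getLastD_congr _ _ [] (pvChunks_ne_nil size (run.drop size.toNat))]
    exact ih
  | case2 run hc =>
    simp only [List.getLastD_cons, List.getLastD_nil]
    simp only [not_and, not_lt] at hc
    omega

-- how the chunk list grows when one element is appended to the run
theorem pvChunks_snoc (size : Int) (hs : 1 ≤ size) (run : List (List (String × String)))
    (_h : run ≠ []) (x : List (String × String)) :
    pvChunks size (run ++ [x]) =
      if ((pvChunks size run).getLastD []).length < size.toNat
      then (pvChunks size run).dropLast ++ [((pvChunks size run).getLastD []) ++ [x]]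
      else pvChunks size run ++ [[x]] := by
  fun_induction pvChunks size run with
  | case1 run hc ih =>
    have hd : run.drop size.toNat ≠ [] := pvChunks_drop_ne_nil size run hc
    have htn : size.toNat ≤ run.length := by omega
    have hCd := pvChunks_ne_nil size (run.drop size.toNat)
    rw [pvChunks]
    rw [dif_pos (by simp only [List.length_append, List.length_cons, List.length_nil]; push_cast; omega)]
    rw [List.take_append_of_le_length htn, List.drop_append_of_le_length htn]
    rw [List.getLastD_cons, pv_getLastD_congr _ (run.take size.toNat) [] hCd,
      List.dropLast_cons_of_ne_nil hCd, ih hd]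
    split <;> simp
  | case2 run hc =>
    simp only [not_and, not_lt] at hc
    have hlen : (run.length : Int) ≤ size := hc hs
    simp only [List.getLastD_cons, List.getLastD_nil]
    by_cases heq : run.length = size.toNat
    · rw [pvChunks]
      rw [dif_pos (by simp only [List.length_append, List.length_cons, List.length_nil]; push_cast; omega)]
      rw [List.take_append_of_le_length (by omega), List.drop_append_of_le_length (by omega)]
      rw [← heq, List.take_length, List.drop_length, List.nil_append,
        pvChunks_singleton size hs]
      rw [if_neg (by omega)]
      simp
    · rw [pvChunks]
      rw [dif_neg (by simp only [List.length_append, List.length_cons, List.length_nil]; push_cast; omega)]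
      rw [if_pos (by omega)]
      simp

-- one loop step preserves the invariant
theorem pvStep_inv (subtitles : List (List (String × String))) (max_segment_size : Int)
    (size : Int) (hsz : size = if max_segment_size > 1 then max_segment_size else 1)
    (st : List (List (List (String × String))) × List (List (String × String)))
    (runs : List (List (List (String × String)))) (i : Int)
    (x : List (String × String))
    (hInv : pvInv size st runs) (hi : runs ≠ [] → 0 < i) :
    pvInv size (pvStepA subtitles max_segment_size st (i, x)) (pvStepB subtitles runs (i, x)) := by
  have hs1 : 1 ≤ size := by rw [hsz]; split <;> omega
  obtain ⟨segs, cur⟩ := st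
  unfold pvStepA pvStepB
  dsimp only at hInv ⊢
  by_cases htext : pvTextOf x = ""
  · simpa [htext] using hInv
  rw [if_neg htext, if_neg htext]
  rcases hInv with ⟨h1, h2, h3⟩ | ⟨rs, r, hruns, hr, hsegs, hcur⟩
  · -- nothing collected yet: both start the first run / segment
    dsimp only at h1 h2
    subst h1; subst h2; subst h3
    rw [if_pos (Or.inl rfl), if_neg (by simp), if_neg (by simp)]
    right
    exact ⟨[], [x], by simp, by simp, by simp [pvChunks_singleton size hs1],
      by simp [pvChunks_singleton size hs1]⟩
  · dsimp only at hsegs hcur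
    have hi0 : 0 < i := hi (by simp [hruns])
    have hlast : cur ≠ [] := by rw [hcur]; exact pvChunks_last_ne_nil size hs1 r hr
    have hlen : cur.length ≤ size.toNat := by
      rw [hcur]; exact pvChunks_last_len_le size hs1 r
    have hlen1 : 1 ≤ cur.length := List.length_pos_iff.mpr hlast
    subst hruns
    by_cases hgap : pvGap subtitles i x = true
    · -- a time gap: both close the current run / segment and start a new one
      rw [if_pos (Or.inr ⟨hi0, hgap⟩), if_pos hlast, if_neg (by simp [hgap])]
      right
      refine ⟨rs ++ [r], [x], by simp, by simp, ?_, by simp [pvChunks_singleton size hs1]⟩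
      rw [pvChunks_singleton size hs1]
      simp only [List.dropLast, List.append_nil, List.flatMap_append,
        List.flatMap_cons, List.flatMap_nil, List.append_nil]
      rw [hsegs, hcur, List.append_assoc, pv_dropLast_getLastD _ _ (pvChunks_ne_nil size r)]
    · -- continuous: B appends to the last run; A extends or cuts the current segment
      rw [if_neg (by rintro (h | ⟨_, h⟩); exacts [hlast h, hgap h]),
        if_pos (show (rs ++ [r] ≠ [] ∧ ¬pvGap subtitles i x = true) from ⟨by simp, hgap⟩)]
      rw [List.dropLast_concat, List.getLastD_concat]
      have hsnoc := pvChunks_snoc size hs1 r hr x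
      rw [← hcur] at hsnoc
      have hiff : ((cur.length : Int) < max_segment_size) ↔ (cur.length < size.toNat) := by
        rw [hsz] at hlen
        split_ifs at hlen with h <;> omega
      by_cases hfit : cur.length < size.toNat
      · -- room in the current chunk
        rw [if_pos (hiff.mpr hfit)]
        rw [if_pos hfit] at hsnoc
        right
        refine ⟨rs, r ++ [x], rfl, by simp, ?_, ?_⟩
        · dsimp only
          rw [hsnoc, List.dropLast_concat, hsegs]
        · dsimp only
          rw [hsnoc, List.getLastD_concat]
      · -- current chunk is full: A cuts, which is exactly a new chunk of the same run
        rw [if_neg (fun hh => hfit (hiff.mp hh))]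
        rw [if_neg hfit] at hsnoc
        right
        refine ⟨rs, r ++ [x], rfl, by simp, ?_, ?_⟩
        · dsimp only
          rw [hsnoc, List.dropLast_concat, hsegs, hcur, List.append_assoc,
            pv_dropLast_getLastD _ _ (pvChunks_ne_nil size r)]
        · dsimp only
          rw [hsnoc, List.getLastD_concat]

-- the whole traversal preserves the invariant
theorem pvFold_inv (subtitles : List (List (String × String))) (max_segment_size : Int)
    (size : Int) (hsz : size = if max_segment_size > 1 then max_segment_size else 1)
    (xs : List (List (String × String))) (s : Int) (hs : 0 ≤ s)
    (st : List (List (List (String × String))) × List (List (String × String)))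
    (runs : List (List (List (String × String))))
    (hInv : pvInv size st runs) (hi : runs ≠ [] → 0 < s) :
    pvInv size ((PySem.List.enumerate xs s).foldl (pvStepA subtitles max_segment_size) st)
      ((PySem.List.enumerate xs s).foldl (pvStepB subtitles) runs) := by
  induction xs generalizing s st runs with
  | nil => simpa [PySem.List.enumerate] using hInv
  | cons y ys ih =>
    rw [PySem.List.enumerate_cons]
    simp only [List.foldl_cons]
    exact ih (s + 1) (by omega) _ _
      (pvStep_inv subtitles max_segment_size size hsz st runs s y hInv hi)
      (fun _ => by omega)

-- ===== VERDICT (by name: the statement is the Claim_ definition above) =====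
theorem detect_continuous_segments_spec : Claim_equal_detect_continuous_segments := by
  intro subtitles max_segment_size _ _
  unfold Spec_detect_continuous_segments detect_continuous_segments detect_continuous_segments_alt
  set size : Int := if max_segment_size > 1 then max_segment_size else 1 with hsz
  have hs1 : 1 ≤ size := by rw [hsz]; split <;> omega
  have hInv := pvFold_inv subtitles max_segment_size size hsz subtitles 0 le_rfl
    ([], []) [] (Or.inl ⟨rfl, rfl, rfl⟩) (by simp)
  rw [PySem.List.foldl_append_eq_flatMap]
  unfold pvCloseA
  rcases hInv with ⟨h1, h2, h3⟩ | ⟨rs, r, hruns, hr, hsegs, hcur⟩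
  · rw [h3]; simp [h1, h2]
  · have hlast := pvChunks_last_ne_nil size hs1 r hr
    rw [hruns, if_pos (by rw [hcur]; exact hlast), hsegs, hcur, List.append_assoc,
      pv_dropLast_getLastD _ _ (pvChunks_ne_nil size r)]
    simp
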